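-- pv_equiv track=rewrite | github.com/kevinqu0820/TAOR-Group13 | HGA.py | shedEmptyRoutes
-- ===== SOURCE A (Python) =====
-- def depth(l):
--     if l == []:
--         return 0
--     if isinstance(l, list):
--         return 1 + max(depth(item) for item in l)
--     else:
--         return 0
--
-- def shedEmptyRoutes(routes):
--     a = []
--     if depth(routes) == 1:
--         b = []
--         for e in routes:
--             if e != []:
--                 b.append(e)
--         a = b
--     else:
--         for l in routes:
--             shed = shedEmptyRoutes(l)
--             if shed != []:
--                 a.append(shed)
--     return a
-- ===== SOURCE B (Python) =====
-- def shedEmptyRoutes(routes):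
--     return [r for r in routes if r != []]
-- ===== Notes on version B (the rewrite author's own statement) =====
-- stated objective: simpler
-- what changed: Replaces the recursive depth computation plus two accumulator loops with a single non-recursive filter of the non-empty sublists, which is the whole behaviour on list-of-lists-of-ints input.
import Mathlib
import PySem

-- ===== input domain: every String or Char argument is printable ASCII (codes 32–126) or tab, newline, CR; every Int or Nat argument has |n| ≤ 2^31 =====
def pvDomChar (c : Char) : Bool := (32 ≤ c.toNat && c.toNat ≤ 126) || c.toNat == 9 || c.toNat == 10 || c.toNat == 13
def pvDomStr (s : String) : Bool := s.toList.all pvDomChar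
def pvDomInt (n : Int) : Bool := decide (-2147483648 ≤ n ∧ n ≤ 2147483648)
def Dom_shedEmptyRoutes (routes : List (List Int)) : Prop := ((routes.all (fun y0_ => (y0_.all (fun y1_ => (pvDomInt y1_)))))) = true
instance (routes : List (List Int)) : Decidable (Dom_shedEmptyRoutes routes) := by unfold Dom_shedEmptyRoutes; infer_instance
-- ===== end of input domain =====

-- B replaces A's recursive depth computation and accumulator loops with a single
-- non-recursive filter of the non-empty sublists (same return value on List (List Int)).

-- ===== PORT A =====
-- depth of a non-list Python value (an int) is 0
def pvDepthInt (_x : Int) : Int := 0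

-- depth(l) for l : list[int]: 0 if empty, else 1 + max of member depths
def pvDepthInner (l : List Int) : Int :=
  match l with
  | [] => 0
  | h :: t => 1 + (t.map pvDepthInt).foldl max (pvDepthInt h)

-- depth(routes) for routes : list[list[int]]
def pvDepthOuter (routes : List (List Int)) : Int :=
  match routes with
  | [] => 0
  | h :: t => 1 + (t.map pvDepthInner).foldl max (pvDepthInner h)

-- the recursive call shedEmptyRoutes(l) at type list[int]:
-- depth(l) == 1 branch filters on 'e != []' which is always True for an int e;
-- otherwise l == [] and the for-loop body never runs, giving []
def pvShedInner (l : List Int) : List Int :=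
  if pvDepthInner l = 1 then l.foldl (fun b e => b ++ [e]) [] else []

def shedEmptyRoutes (routes : List (List Int)) : List (List Int) :=
  if pvDepthOuter routes = 1 then
    routes.foldl (fun b e => if e ≠ [] then b ++ [e] else b) []
  else
    routes.foldl (fun a l => let shed := pvShedInner l; if shed ≠ [] then a ++ [shed] else a) []

-- ===== PORT B =====
def shedEmptyRoutes_alt (routes : List (List Int)) : List (List Int) :=
  routes.filter (fun r => r ≠ [])

-- ===== PRECONDITION & SPEC =====
def Spec_shedEmptyRoutes (routes : List (List Int)) (out : List (List Int)) : Prop := out = shedEmptyRoutes_alt routes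
instance (routes : List (List Int)) (out : List (List Int)) : Decidable (Spec_shedEmptyRoutes routes out) := by unfold Spec_shedEmptyRoutes; infer_instance

-- ===== CLAIM (what is proved, stated in full; the proofs are below) =====
def Claim_equal_shedEmptyRoutes : Prop := ∀ (routes : List (List Int)), Dom_shedEmptyRoutes routes → Spec_shedEmptyRoutes routes (shedEmptyRoutes routes)

-- ===== LEMMAS AND PROOFS =====

-- ===== VERDICT (by name: the statement is the Claim_ definition above) =====
theorem pvFoldMaxZero (t : List Int) : (t.map pvDepthInt).foldl max (0 : Int) = 0 := by
  induction t with
  | nil => rfl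
  | cons h t ih => simpa [pvDepthInt] using ih

theorem pvShedInner_eq (l : List Int) : pvShedInner l = l := by
  cases l with
  | nil => rfl
  | cons h t =>
    simp only [pvShedInner, pvDepthInner, pvDepthInt, pvFoldMaxZero]
    simpa using PySem.List.foldl_append_singleton t [h]

theorem pvFoldFilter (routes : List (List Int)) (acc : List (List Int)) :
    routes.foldl (fun b e => if e ≠ [] then b ++ [e] else b) acc
      = acc ++ routes.filter (fun r => r ≠ []) := by
  induction routes generalizing acc with
  | nil => simp
  | cons h t ih =>
    by_cases hh : h = []
    · rw [List.foldl_cons, if_neg (by simp [hh]), ih]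
      simp [hh]
    · rw [List.foldl_cons, if_pos hh, ih]
      simp [hh]

theorem shedEmptyRoutes_spec : Claim_equal_shedEmptyRoutes := by
  intro routes _
  unfold Spec_shedEmptyRoutes shedEmptyRoutes shedEmptyRoutes_alt
  split
  · simpa using pvFoldFilter routes []
  · simp only [pvShedInner_eq]
    simpa using pvFoldFilter routes []
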